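-- pv_equiv track=rewrite | github.com/Lenir/TIL | Online Judge/Codility_Python3/[Respactable]GenomicRangeQuery.py | getGemMap
-- ===== SOURCE A (Python) =====
-- def getGemMap(S):
--     genMap = [[], [], []]
--     for index in range(len(S)):
--         char = S[index]
--         if char == 'A':
--             genMap[0].append(index)
--         elif char == 'C':
--             genMap[1].append(index)
--         elif char == 'G':
--             genMap[2].append(index)
--         else:
--             pass
--     return genMap
-- ===== SOURCE B (Python) =====
-- def getGemMap(S):
--     A = [i for i, c in enumerate(S) if c == 'A']
--     C = [i for i, c in enumerate(S) if c == 'C']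
--     G = [i for i, c in enumerate(S) if c == 'G']
--     return [A, C, G]
-- ===== Notes on version B (the rewrite author's own statement) =====
-- stated objective: idiomatic
-- what changed: Replaces the single index loop with chained if/elif branches mutating a preallocated 3-list structure by three independent enumerate-based comprehensions, one full scan per target letter.
import Mathlib
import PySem

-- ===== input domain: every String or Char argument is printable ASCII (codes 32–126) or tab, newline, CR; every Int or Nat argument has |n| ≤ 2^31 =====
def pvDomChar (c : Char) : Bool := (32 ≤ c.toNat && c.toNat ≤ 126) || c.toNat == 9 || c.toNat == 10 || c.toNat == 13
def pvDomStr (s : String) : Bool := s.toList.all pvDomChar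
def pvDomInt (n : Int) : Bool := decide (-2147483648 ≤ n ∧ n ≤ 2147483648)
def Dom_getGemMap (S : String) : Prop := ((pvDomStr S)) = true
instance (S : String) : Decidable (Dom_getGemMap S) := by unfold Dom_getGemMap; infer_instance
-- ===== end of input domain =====

-- B replaces A's single index loop with if/elif dispatch by three independent per-letter scans (idiomatic; same O(n) cost).


-- ===== PORT A =====
-- one step of A's loop body: char = S[index]; if/elif dispatch appending index
def gemStep (L : List Char) (g : List Int × List Int × List Int) (index : Int) :
    List Int × List Int × List Int :=
  match PySem.List.pyGet? L index with
  | some char =>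
      if char = 'A' then (g.1 ++ [index], g.2.1, g.2.2)
      else if char = 'C' then (g.1, g.2.1 ++ [index], g.2.2)
      else if char = 'G' then (g.1, g.2.1, g.2.2 ++ [index])
      else g
  | none => g  -- unreachable: index ranges over range(len(S))

def getGemMap (S : String) : List (List Int) :=
  let g := (PySem.List.pyRange 0 (S.toList.length : Int) 1).foldl (gemStep S.toList) ([], [], [])
  [g.1, g.2.1, g.2.2]

-- ===== PORT B =====
-- [i for i, c in enumerate(S) if c == ch]
def gemIdx (S : String) (ch : Char) : List Int :=
  (PySem.List.enumerate S.toList 0).filterMap (fun p => if p.2 = ch then some p.1 else none)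

def getGemMap_alt (S : String) : List (List Int) :=
  [gemIdx S 'A', gemIdx S 'C', gemIdx S 'G']

-- ===== PRECONDITION & SPEC =====
def Spec_getGemMap (S : String) (out : List (List Int)) : Prop := out = getGemMap_alt S
instance (S : String) (out : List (List Int)) : Decidable (Spec_getGemMap S out) := by unfold Spec_getGemMap; infer_instance

-- ===== CLAIM (what is proved, stated in full; the proofs are below) =====
def Claim_equal_getGemMap : Prop := ∀ (S : String), Dom_getGemMap S → Spec_getGemMap S (getGemMap S)

-- ===== LEMMAS AND PROOFS =====

def gemIdxFrom (suf : List Char) (s : Int) (ch : Char) : List Int :=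
  (PySem.List.enumerate suf s).filterMap (fun p => if p.2 = ch then some p.1 else none)

theorem gemLoop (suf : List Char) : ∀ (pre : List Char) (g : List Int × List Int × List Int),
    ((PySem.List.pyRange (pre.length : Int) ((pre ++ suf).length : Int) 1).foldl
        (gemStep (pre ++ suf)) g) =
      (g.1 ++ gemIdxFrom suf pre.length 'A',
       g.2.1 ++ gemIdxFrom suf pre.length 'C',
       g.2.2 ++ gemIdxFrom suf pre.length 'G') := by
  induction suf with
  | nil =>
      intro pre g
      simp [gemIdxFrom, PySem.List.pyRange_one_eq_nil]
  | cons c t ih =>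
      intro pre g
      have hlt : (pre.length : Int) < ((pre ++ c :: t).length : Int) := by
        simp
      rw [PySem.List.pyRange_one_cons hlt, List.foldl_cons]
      have hstep : gemStep (pre ++ c :: t) g (pre.length : Int) =
          (if c = 'A' then (g.1 ++ [(pre.length : Int)], g.2.1, g.2.2)
           else if c = 'C' then (g.1, g.2.1 ++ [(pre.length : Int)], g.2.2)
           else if c = 'G' then (g.1, g.2.1, g.2.2 ++ [(pre.length : Int)])
           else g) := by
        rw [gemStep, PySem.List.pyGet?_append_length]
      have hcast : ((pre.length : Int) + 1) = (((pre ++ [c]).length : Nat) : Int) := by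
        simp
      have happ : pre ++ c :: t = (pre ++ [c]) ++ t := by simp
      have henum : ∀ ch, gemIdxFrom (c :: t) (pre.length : Int) ch =
          (if c = ch then [(pre.length : Int)] else []) ++ gemIdxFrom t ((pre.length : Int) + 1) ch := by
        intro ch
        simp only [gemIdxFrom, PySem.List.enumerate_cons, List.filterMap_cons]
        split_ifs <;> simp
      have ihh : ∀ g' : List Int × List Int × List Int,
          (PySem.List.pyRange (((pre ++ [c]).length : Nat) : Int)
                ((((pre ++ [c]) ++ t).length : Nat) : Int) 1).foldl (gemStep ((pre ++ [c]) ++ t)) g' =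
            (g'.1 ++ gemIdxFrom t ((pre ++ [c]).length : Int) 'A',
             g'.2.1 ++ gemIdxFrom t ((pre ++ [c]).length : Int) 'C',
             g'.2.2 ++ gemIdxFrom t ((pre ++ [c]).length : Int) 'G') := ih (pre ++ [c])
      rw [hstep, show ((pre ++ c :: t).length : Int) = (((pre ++ [c]) ++ t).length : Int) from
            by rw [← happ], hcast, show pre ++ c :: t = (pre ++ [c]) ++ t from happ, ihh]
      simp only [henum]
      rw [← hcast]
      clear ih ihh hstep hlt
      split_ifs with h1 h2 h3 <;> simp_all

theorem getGemMap_spec : Claim_equal_getGemMap := by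
  intro S _
  unfold Spec_getGemMap getGemMap getGemMap_alt
  have h := gemLoop S.toList [] ([], [], [])
  simp only [List.nil_append, List.length_nil, Nat.cast_zero] at h
  rw [h]
  simp [gemIdx, gemIdxFrom]
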